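-- pv_equiv track=rewrite | github.com/SooOverpowered/AOC | 2015/08.py | part2
-- ===== SOURCE A (Python) =====
-- def part2(data):
--     lines = data.rstrip().split('\n')
--     total = 0
--     for line in lines:
--         temp = [i for i in line]
--         temp2 = ['"']
--         for string in temp:
--             if string == '"':
--                 temp2.extend(['\\', '"'])
--             elif string == '\\':
--                 temp2.extend(['\\', '\\'])
--             else:
--                 temp2.append(string)
--         temp2.append('"')
--         total += len(''.join(temp2))-len(line)
--     return total
-- ===== SOURCE B (Python) =====
-- def part2(data):
--     return sum(2 + line.count('"') + line.count('\\')
--                for line in data.rstrip().split('\n'))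
-- ===== Notes on version B (the rewrite author's own statement) =====
-- stated objective: faster
-- what changed: Replaces the per-character loop that builds the escaped character list and joins it with a closed-form per-line delta of 2 plus the counts of double-quote and backslash characters, summed over the lines.
import Mathlib
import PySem

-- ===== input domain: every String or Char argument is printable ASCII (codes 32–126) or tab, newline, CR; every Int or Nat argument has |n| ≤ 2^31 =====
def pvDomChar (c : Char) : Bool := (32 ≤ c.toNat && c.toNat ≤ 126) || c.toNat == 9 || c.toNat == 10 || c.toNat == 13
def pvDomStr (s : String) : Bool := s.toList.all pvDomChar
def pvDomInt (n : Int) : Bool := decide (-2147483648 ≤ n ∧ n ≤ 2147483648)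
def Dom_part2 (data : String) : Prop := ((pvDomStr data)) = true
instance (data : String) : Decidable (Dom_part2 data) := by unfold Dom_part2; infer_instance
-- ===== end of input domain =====

-- B replaces A's per-character encoding loop by a closed-form per-line count; objective: faster by a constant factor (no per-character list building).

-- ===== PORT A =====
-- strings handled on the char-list side (PySem.Chars is exact there)
def part2 (data : String) : Int :=
  let lines := PySem.Chars.splitOn (PySem.Chars.rstrip data.toList) ['\n']
  lines.foldl (fun total line =>
    let temp := line
    let temp2 := temp.foldl (fun t2 c =>
      if c = '"' then t2 ++ ['\\', '"']
      else if c = '\\' then t2 ++ ['\\', '\\']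
      else t2 ++ [c]) ['"']
    let temp2 := temp2 ++ ['"']
    total + ((PySem.Chars.join [] (temp2.map (fun c => [c]))).length : Int)
          - (line.length : Int)) 0

-- ===== PORT B =====
def part2_alt (data : String) : Int :=
  ((PySem.Chars.splitOn (PySem.Chars.rstrip data.toList) ['\n']).map
    (fun line => 2 + (PySem.Chars.count line ['"'] : Int)
                   + (PySem.Chars.count line ['\\'] : Int))).sum

-- ===== PRECONDITION & SPEC =====
def Spec_part2 (data : String) (out : Int) : Prop := out = part2_alt data
instance (data : String) (out : Int) : Decidable (Spec_part2 data out) := by unfold Spec_part2; infer_instance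

-- ===== CLAIM (what is proved, stated in full; the proofs are below) =====
def Claim_equal_part2 : Prop := ∀ (data : String), Dom_part2 data → Spec_part2 data (part2 data)

-- ===== LEMMAS AND PROOFS =====

-- the fuel-indexed substring scanner, specialised to a one-char pattern
theorem go_singleton (c : Char) (l : List Char) : ∀ (fuel acc : Nat), l.length ≤ fuel →
    PySem.Chars.count.go [c] fuel l acc = acc + l.count c := by
  induction l with
  | nil => intro fuel acc _; cases fuel <;> simp [PySem.Chars.count.go]
  | cons h t ih =>
    intro fuel acc hle
    cases fuel with
    | zero => simp at hle
    | succ f =>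
      by_cases hc : c = h
      · subst hc
        rw [PySem.Chars.count.go]
        simp [List.isPrefixOf, ih f (acc+1) (by simpa using hle)]
        omega
      · rw [PySem.Chars.count.go]
        simp [List.isPrefixOf, Ne.symm hc, hc, ih f acc (by simpa using hle)]

-- Python str.count of a single character equals the element count
theorem chars_count_singleton (cs : List Char) (c : Char) :
    PySem.Chars.count cs [c] = cs.count c := by
  simp [PySem.Chars.count, go_singleton c cs cs.length 0 le_rfl]

-- length of ''.join over single-character pieces
theorem join_singletons_append_length (l : List Char) (c : Char) :
    (PySem.Chars.join [] (l.map (fun ch => [ch]) ++ [[c]])).length = l.length + 1 := by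
  have h : l.map (fun ch => [ch]) ++ [[c]] = (l ++ [c]).map (fun ch => [ch]) := by simp
  rw [h, PySem.Chars.join_nil_singletons]
  simp

-- length of the encoded list built by A's inner loop
theorem encode_foldl_length (cs : List Char) (acc : List Char) :
    (cs.foldl (fun t2 ch =>
      if ch = '"' then t2 ++ ['\\', '"']
      else if ch = '\\' then t2 ++ ['\\', '\\']
      else t2 ++ [ch]) acc).length
      = acc.length + cs.length + cs.count '"' + cs.count '\\' := by
  induction cs generalizing acc with
  | nil => simp
  | cons h t ih =>
    simp only [List.foldl_cons]
    split_ifs with h1 h2 <;>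
      simp [ih, List.count_cons, h1, *] <;> omega

-- ===== VERDICT (by name: the statement is the Claim_ definition above) =====
theorem part2_spec : Claim_equal_part2 := by
  intro data _
  unfold Spec_part2 part2 part2_alt
  generalize PySem.Chars.splitOn (PySem.Chars.rstrip data.toList) ['\n'] = lines
  induction lines using List.reverseRecOn with
  | nil => simp
  | append_singleton ls line ih =>
    simp only [List.foldl_append, List.foldl_cons, List.foldl_nil, List.map_append,
      List.map_cons, List.map_nil, List.sum_append, List.sum_cons, List.sum_nil,
      chars_count_singleton] at ih ⊢
    rw [ih, join_singletons_append_length, encode_foldl_length]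
    push_cast [List.length_singleton]
    ring
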